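-- pv_equiv track=rewrite | github.com/qmaurmann/five_cards | solution.py | find_gap_parity_case
-- ===== SOURCE A (Python) =====
-- from collections import namedtuple
--
-- def find_gaps(sorted_cards):
--     """
--     Find "gaps mod 52" between a sorted sequence of cards. Example:
--     >>> find_gaps((3, 4, 8, 12, 47))
--     (0, 3, 3, 34, 7)
--
--     The last gap (7 in this case) "wraps around" from the last to first card.
--     """
--     n = len(sorted_cards)
--     data = [sorted_cards[i+1] - sorted_cards[i] - 1 for i in range(n-1)]
--     data.append(52 + sorted_cards[0] - sorted_cards[-1] - 1)
--     return tuple(data)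
--
-- GAP_PARITY_5_CASES = (
--     (0, 0, 0, 0, 1),
--     (0, 0, 1, 1, 1),
--     (0, 1, 0, 1, 1),
--     (1, 1, 1, 1, 1)
-- )
--
-- GAP_PARITY_4_CASES = (
--     (0, 0, 1, 1),
--     (0, 1, 0, 1),
--     (1, 1, 1, 1)
-- )
--
-- def parities(nums):
--     return tuple(n % 2 for n in nums)
--
-- def rotate(sequence, step=1):
--     return sequence[step:] + sequence[:step]
--
-- def rotations(sequence):
--     curr = sequence
--     yield curr
--     for _ in range(len(sequence)-1):
--         curr = rotate(curr)
--         yield curr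
--
-- CaseAndRot = namedtuple("CaseAndRot", "par_case rot_num")
--
-- def find_gap_parity_case(sorted_cards):
--     """
--     Find which gap parity case is represented, as well as how many rotations
--     are needed to align the hand to the canonical representative of that case.
--     Examples:
--     >>> find_gap_parity_case((3, 4, 8, 12, 47))
--     CaseAndRot(par_case=(0, 1, 0, 1, 1), rot_num=3)
--     >>> find_gap_parity_case((3, 4, 12, 47))
--     CaseAndRot(par_case=(0, 1, 0, 1), rot_num=0)
--     """
--     n = len(sorted_cards)
--     if n == 4:
--         gap_parity_cases = GAP_PARITY_4_CASES
--     elif n == 5: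
--         gap_parity_cases = GAP_PARITY_5_CASES
--     else:
--         raise ValueError("Expected sequence of length 4 or 5; got {}".format(sorted_cards))
--     gaps = find_gaps(sorted_cards)
--     parity_rotations = rotations(parities(gaps))
--     for rot_num, par_case in enumerate(parity_rotations):
--         if par_case in gap_parity_cases:
--             return CaseAndRot(par_case=par_case, rot_num=rot_num)
--     raise ValueError("Could not align {} with any gap parity case".format(sorted_cards))
-- ===== SOURCE B (Python) =====
-- # B: precomputed lookup table (parity tuple -> (canonical case, rot_num)) replaces A's rotation scan.
-- from collections import namedtuple
--
-- CaseAndRot = namedtuple("CaseAndRot", "par_case rot_num")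
--
-- _CASES = {
--     4: ((0, 0, 1, 1), (0, 1, 0, 1), (1, 1, 1, 1)),
--     5: ((0, 0, 0, 0, 1), (0, 0, 1, 1, 1), (0, 1, 0, 1, 1), (1, 1, 1, 1, 1)),
-- }
--
-- def _build_table(cases):
--     # r ascending so the smallest rot_num wins via setdefault
--     n = len(cases[0])
--     table = {}
--     for r in range(n):
--         for case in cases:
--             key = case[-r:] + case[:-r] if r else case  # right-rotate case by r
--             table.setdefault(key, (case, r))
--     return table
--
-- _TABLES = {n: _build_table(cases) for n, cases in _CASES.items()}
--
-- def find_gap_parity_case(sorted_cards):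
--     n = len(sorted_cards)
--     if n not in _TABLES:
--         raise ValueError("Expected sequence of length 4 or 5; got {}".format(sorted_cards))
--     par = tuple((sorted_cards[(i + 1) % n] - sorted_cards[i] - 1 + (52 if i == n - 1 else 0)) % 2
--                 for i in range(n))
--     try:
--         case, r = _TABLES[n][par]
--     except KeyError:
--         raise ValueError("Could not align {} with any gap parity case".format(sorted_cards))
--     return CaseAndRot(par_case=case, rot_num=r)
-- ===== Notes on version B (the rewrite author's own statement) =====
-- stated objective: alternative
-- what changed: Replaces A's per-call rotation-generating scan over the gap-parity tuple with a precomputed lookup table (built once per hand length by right-rotating each canonical case, setdefault keeping the smallest rotation count) so each call is one parity computation and one dict lookup.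
import Mathlib
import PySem

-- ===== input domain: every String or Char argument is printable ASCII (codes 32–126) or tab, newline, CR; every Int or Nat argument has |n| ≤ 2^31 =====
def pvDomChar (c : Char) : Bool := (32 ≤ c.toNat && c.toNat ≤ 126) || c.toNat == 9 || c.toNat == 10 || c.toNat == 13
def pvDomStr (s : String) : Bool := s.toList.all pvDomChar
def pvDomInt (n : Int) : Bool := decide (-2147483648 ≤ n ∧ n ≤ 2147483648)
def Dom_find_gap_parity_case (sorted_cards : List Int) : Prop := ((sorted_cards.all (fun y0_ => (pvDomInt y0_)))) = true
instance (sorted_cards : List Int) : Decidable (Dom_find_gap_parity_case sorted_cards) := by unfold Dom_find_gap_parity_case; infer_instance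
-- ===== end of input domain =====

-- B replaces A's rotation-generating scan by a precomputed lookup table from parity tuples to
-- (canonical case, rotation count); objective: alternative (index-then-lookup decomposition).

-- ===== PORT A =====
def GAP_PARITY_5_CASES : List (List Int) :=
  [[0, 0, 0, 0, 1], [0, 0, 1, 1, 1], [0, 1, 0, 1, 1], [1, 1, 1, 1, 1]]

def GAP_PARITY_4_CASES : List (List Int) :=
  [[0, 0, 1, 1], [0, 1, 0, 1], [1, 1, 1, 1]]

-- find_gaps(sorted_cards)
def pyFindGaps (sorted_cards : List Int) : List Int :=
  let n : Int := sorted_cards.length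
  let data := (PySem.List.pyRange 0 (n - 1) 1).map
    (fun i => PySem.List.pyGetD sorted_cards (i + 1) 0 - PySem.List.pyGetD sorted_cards i 0 - 1)
  data ++ [52 + PySem.List.pyGetD sorted_cards 0 0 - PySem.List.pyGetD sorted_cards (-1) 0 - 1]

-- parities(nums)
def pyParities (nums : List Int) : List Int := nums.map (fun m => PySem.Int.mod m 2)

-- rotate(sequence) (step=1)
def pyRotate (seq : List Int) : List Int := seq.drop 1 ++ seq.take 1

-- the 'for rot_num, par_case in enumerate(rotations(...))' loop; rotations yields len(sequence) items,
-- so that is the fuel; fuel 0 = loop exhausted = Python raises ValueError (an input outside Pre_)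
def alignLoop (cases : List (List Int)) : Nat → List Int → Int → List Int × Int
  | 0, _, _ => ([], -1)
  | k + 1, curr, rot =>
    if curr ∈ cases then (curr, rot) else alignLoop cases k (pyRotate curr) (rot + 1)

def find_gap_parity_case (sorted_cards : List Int) : List Int × Int :=
  let n := sorted_cards.length
  if n = 4 ∨ n = 5 then
    let cases := if n = 4 then GAP_PARITY_4_CASES else GAP_PARITY_5_CASES
    let par := pyParities (pyFindGaps sorted_cards)
    alignLoop cases par.length par 0
  else ([], -1)  -- Python: raise ValueError (outside Pre_)

-- ===== PORT B =====
def ALT_CASES_4 : List (List Int) := [[0, 0, 1, 1], [0, 1, 0, 1], [1, 1, 1, 1]]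
def ALT_CASES_5 : List (List Int) :=
  [[0, 0, 0, 0, 1], [0, 0, 1, 1, 1], [0, 1, 0, 1, 1], [1, 1, 1, 1, 1]]

-- _build_table(cases): key = case[-r:] + case[:-r] if r else case, setdefault keeps smallest r
def altBuildTable (cases : List (List Int)) : PySem.Dict (List Int) (List Int × Int) :=
  let n : Int := (PySem.List.pyGetD cases 0 []).length
  (PySem.List.pyRange 0 n 1).foldl
    (fun tbl r =>
      cases.foldl
        (fun tbl case =>
          let key := if r ≠ 0 then
              PySem.List.slice case (some (-r)) none ++ PySem.List.slice case none (some (-r))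
            else case
          tbl.setdefault key (case, r))
        tbl)
    PySem.Dict.empty

def ALT_TABLE_4 : PySem.Dict (List Int) (List Int × Int) := altBuildTable ALT_CASES_4
def ALT_TABLE_5 : PySem.Dict (List Int) (List Int × Int) := altBuildTable ALT_CASES_5

-- the try/except lookup: KeyError = Python raises ValueError (outside Pre_)
def altLookup (tbl : PySem.Dict (List Int) (List Int × Int)) (par : List Int) : List Int × Int :=
  match tbl.get? par with
  | some cr => cr
  | none => ([], -1)

def find_gap_parity_case_alt (sorted_cards : List Int) : List Int × Int :=
  let n := sorted_cards.length
  if n = 4 ∨ n = 5 then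
    let par := (PySem.List.pyRange 0 (n : Int) 1).map
      (fun i =>
        PySem.Int.mod
          (PySem.List.pyGetD sorted_cards (PySem.Int.mod (i + 1) (n : Int)) 0 -
              PySem.List.pyGetD sorted_cards i 0 - 1 +
            (if i = (n : Int) - 1 then 52 else 0)) 2)
    altLookup (if n = 4 then ALT_TABLE_4 else ALT_TABLE_5) par
  else ([], -1)  -- Python: raise ValueError (outside Pre_)

-- ===== PRECONDITION & SPEC =====
-- Pre_ excludes exactly the inputs where A raises ValueError: lists whose length is not 4 or 5,
-- and length-4 hands whose consecutive gaps are all even (no gap-parity case matches).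
def Pre_find_gap_parity_case (sorted_cards : List Int) : Prop :=
  sorted_cards.length = 5 ∨
    (sorted_cards.length = 4 ∧
      ¬((sorted_cards.getD 1 0 - sorted_cards.getD 0 0) % 2 = 1 ∧
        (sorted_cards.getD 2 0 - sorted_cards.getD 1 0) % 2 = 1 ∧
        (sorted_cards.getD 3 0 - sorted_cards.getD 2 0) % 2 = 1))

instance (sorted_cards : List Int) : Decidable (Pre_find_gap_parity_case sorted_cards) := by
  unfold Pre_find_gap_parity_case; infer_instance

def pvWitness_find_gap_parity_case : List Int := [3, 4, 12, 47]

def Spec_find_gap_parity_case (sorted_cards : List Int) (out : List Int × Int) : Prop :=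
  out = find_gap_parity_case_alt sorted_cards
instance (sorted_cards : List Int) (out : List Int × Int) : Decidable (Spec_find_gap_parity_case sorted_cards out) := by
  unfold Spec_find_gap_parity_case; infer_instance

-- ===== CLAIM (what is proved, stated in full; the proofs are below) =====
def Claim_equal_find_gap_parity_case : Prop :=
  ∀ (sorted_cards : List Int), Dom_find_gap_parity_case sorted_cards →
    Pre_find_gap_parity_case sorted_cards →
      Spec_find_gap_parity_case sorted_cards (find_gap_parity_case sorted_cards)

-- ===== LEMMAS AND PROOFS =====

lemma mod2_cases (x : Int) : PySem.Int.mod x 2 = 0 ∨ PySem.Int.mod x 2 = 1 := by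
  have := PySem.Int.mod_two_eq x
  tauto

lemma evalA4 (a b c d : Int) :
    find_gap_parity_case [a, b, c, d] =
      alignLoop GAP_PARITY_4_CASES 4
        [PySem.Int.mod (b - a - 1) 2, PySem.Int.mod (c - b - 1) 2,
         PySem.Int.mod (d - c - 1) 2, PySem.Int.mod (52 + a - d - 1) 2] 0 := by
  norm_num [find_gap_parity_case, pyFindGaps, pyParities,
    show PySem.List.pyRange 0 3 = [0, 1, 2] from by decide,
    PySem.List.pyGetD, PySem.List.pyGet?, PySem.List.pyIdx?,
    show (2 : Int).toNat = 2 from rfl, show (3 : Int).toNat = 3 from rfl]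

lemma evalA5 (a b c d e : Int) :
    find_gap_parity_case [a, b, c, d, e] =
      alignLoop GAP_PARITY_5_CASES 5
        [PySem.Int.mod (b - a - 1) 2, PySem.Int.mod (c - b - 1) 2,
         PySem.Int.mod (d - c - 1) 2, PySem.Int.mod (e - d - 1) 2,
         PySem.Int.mod (52 + a - e - 1) 2] 0 := by
  norm_num [find_gap_parity_case, pyFindGaps, pyParities,
    show PySem.List.pyRange 0 4 = [0, 1, 2, 3] from by decide,
    PySem.List.pyGetD, PySem.List.pyGet?, PySem.List.pyIdx?,
    show (2 : Int).toNat = 2 from rfl, show (3 : Int).toNat = 3 from rfl,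
    show (4 : Int).toNat = 4 from rfl]

lemma evalB4 (a b c d : Int) :
    find_gap_parity_case_alt [a, b, c, d] =
      altLookup ALT_TABLE_4
        [PySem.Int.mod (b - a - 1) 2, PySem.Int.mod (c - b - 1) 2,
         PySem.Int.mod (d - c - 1) 2, PySem.Int.mod (a - d - 1 + 52) 2] := by
  norm_num [find_gap_parity_case_alt, altLookup,
    show PySem.List.pyRange 0 4 = [0, 1, 2, 3] from by decide,
    show PySem.Int.mod 1 4 = 1 from by decide, show PySem.Int.mod 2 4 = 2 from by decide,
    show PySem.Int.mod 3 4 = 3 from by decide, show PySem.Int.mod 4 4 = 0 from by decide,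
    PySem.List.pyGetD, PySem.List.pyGet?, PySem.List.pyIdx?,
    show (2 : Int).toNat = 2 from rfl, show (3 : Int).toNat = 3 from rfl]

lemma evalB5 (a b c d e : Int) :
    find_gap_parity_case_alt [a, b, c, d, e] =
      altLookup ALT_TABLE_5
        [PySem.Int.mod (b - a - 1) 2, PySem.Int.mod (c - b - 1) 2,
         PySem.Int.mod (d - c - 1) 2, PySem.Int.mod (e - d - 1) 2,
         PySem.Int.mod (a - e - 1 + 52) 2] := by
  norm_num [find_gap_parity_case_alt, altLookup,
    show PySem.List.pyRange 0 5 = [0, 1, 2, 3, 4] from by decide,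
    show PySem.Int.mod 1 5 = 1 from by decide, show PySem.Int.mod 2 5 = 2 from by decide,
    show PySem.Int.mod 3 5 = 3 from by decide, show PySem.Int.mod 4 5 = 4 from by decide,
    show PySem.Int.mod 5 5 = 0 from by decide,
    PySem.List.pyGetD, PySem.List.pyGet?, PySem.List.pyIdx?,
    show (2 : Int).toNat = 2 from rfl, show (3 : Int).toNat = 3 from rfl,
    show (4 : Int).toNat = 4 from rfl]

lemma core4 (q1 q2 q3 q4 : Int)
    (h1 : q1 = 0 ∨ q1 = 1) (h2 : q2 = 0 ∨ q2 = 1)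
    (h3 : q3 = 0 ∨ q3 = 1) (h4 : q4 = 0 ∨ q4 = 1) :
    alignLoop GAP_PARITY_4_CASES 4 [q1, q2, q3, q4] 0 =
      altLookup ALT_TABLE_4 [q1, q2, q3, q4] := by
  rcases h1 with h1 | h1 <;> rcases h2 with h2 | h2 <;>
    rcases h3 with h3 | h3 <;> rcases h4 with h4 | h4 <;>
      subst h1 h2 h3 h4 <;> decide

lemma core5 (q1 q2 q3 q4 q5 : Int)
    (h1 : q1 = 0 ∨ q1 = 1) (h2 : q2 = 0 ∨ q2 = 1) (h3 : q3 = 0 ∨ q3 = 1)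
    (h4 : q4 = 0 ∨ q4 = 1) (h5 : q5 = 0 ∨ q5 = 1) :
    alignLoop GAP_PARITY_5_CASES 5 [q1, q2, q3, q4, q5] 0 =
      altLookup ALT_TABLE_5 [q1, q2, q3, q4, q5] := by
  rcases h1 with h1 | h1 <;> rcases h2 with h2 | h2 <;> rcases h3 with h3 | h3 <;>
    rcases h4 with h4 | h4 <;> rcases h5 with h5 | h5 <;>
      subst h1 h2 h3 h4 h5 <;> decide

-- ===== VERDICT (by name: the statement is the Claim_ definition above) =====
theorem find_gap_parity_case_spec : Claim_equal_find_gap_parity_case := by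
  intro cards _ hpre
  unfold Spec_find_gap_parity_case
  match cards with
  | [] | [_] | [_, _] | [_, _, _] =>
    simp [Pre_find_gap_parity_case] at hpre
  | [a, b, c, d] =>
    rw [evalA4, evalB4, show a - d - 1 + 52 = 52 + a - d - 1 by ring]
    exact core4 _ _ _ _ (mod2_cases _) (mod2_cases _) (mod2_cases _) (mod2_cases _)
  | [a, b, c, d, e] =>
    rw [evalA5, evalB5, show a - e - 1 + 52 = 52 + a - e - 1 by ring]
    exact core5 _ _ _ _ _ (mod2_cases _) (mod2_cases _) (mod2_cases _) (mod2_cases _) (mod2_cases _)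
  | _ :: _ :: _ :: _ :: _ :: _ :: _ =>
    simp [Pre_find_gap_parity_case] at hpre
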